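-- pv_equiv track=rewrite | github.com/bobhopp-crypto/retroverse-main | data/scripts/generate_hot100_detailed_histories.py | detect_resurgence
-- ===== SOURCE A (Python) =====
-- def detect_resurgence(history, top40_fields):
--     """
--     Detect if song re-entered Top 40 after exiting
--     Returns: boolean
--     """
--     if not top40_fields['last_top40_week']:
--         return False
--
--     # Find all Top 40 weeks
--     top40_weeks = [h for h in history if h['position'] and h['position'] <= 40]
--     if len(top40_weeks) < 2:
--         return False
--
--     # Check for gaps in Top 40 run (re-entry after falling out)
--     in_top40 = False
--     exited_top40 = False
--
--     for week in history:
--         is_top40 = week['position'] and week['position'] <= 40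
--
--         if is_top40 and not in_top40:
--             # Entering Top 40
--             if exited_top40:
--                 # Re-entered after exiting
--                 return True
--             in_top40 = True
--         elif not is_top40 and in_top40:
--             # Exiting Top 40
--             exited_top40 = True
--             in_top40 = False
--
--     return False
-- ===== SOURCE B (Python) =====
-- def detect_resurgence(history, top40_fields):
--     """
--     Detect if song re-entered Top 40 after exiting
--     Returns: boolean
--     """
--     if not top40_fields['last_top40_week']:
--         return False
--     top40_idx = [i for i, h in enumerate(history) if h['position'] and h['position'] <= 40]
--     if len(top40_idx) < 2:
--         return False
--     # a re-entry happened iff the top-40 indices are not one contiguous block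
--     span = top40_idx[-1] - top40_idx[0] + 1
--     return span > len(top40_idx)
-- ===== Notes on version B (the rewrite author's own statement) =====
-- stated objective: simpler
-- what changed: Replaces A's three-state entering/exiting scan with a closed-form check: collect the indices of Top-40 weeks once and report a re-entry iff their span (last - first + 1) exceeds their count, i.e. iff the Top-40 weeks are not one contiguous block.
import Mathlib
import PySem

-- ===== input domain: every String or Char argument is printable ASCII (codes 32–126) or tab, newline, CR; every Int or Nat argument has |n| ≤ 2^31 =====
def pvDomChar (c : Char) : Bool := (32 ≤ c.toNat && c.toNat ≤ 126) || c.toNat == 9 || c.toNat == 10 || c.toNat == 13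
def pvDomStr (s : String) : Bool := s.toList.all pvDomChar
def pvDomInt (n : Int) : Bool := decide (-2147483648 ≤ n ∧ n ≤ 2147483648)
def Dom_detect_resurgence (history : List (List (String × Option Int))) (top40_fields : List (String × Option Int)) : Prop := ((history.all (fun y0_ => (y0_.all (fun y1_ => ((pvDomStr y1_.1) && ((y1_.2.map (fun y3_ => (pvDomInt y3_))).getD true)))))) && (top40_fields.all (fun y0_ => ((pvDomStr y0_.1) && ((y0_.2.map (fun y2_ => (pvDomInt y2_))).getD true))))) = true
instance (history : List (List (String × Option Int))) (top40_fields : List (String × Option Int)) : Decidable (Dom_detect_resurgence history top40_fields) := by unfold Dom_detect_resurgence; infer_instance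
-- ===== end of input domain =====

-- B replaces A's three-state entering/exiting scan by a closed-form span-vs-count check on the Top-40 indices (same O(n) cost, simpler).


-- ===== PORT A =====
-- Python truthiness of an Option Int value (None and 0 are falsy)
def pvTruthy (v : Option Int) : Bool :=
  match v with
  | none => false
  | some n => decide (n ≠ 0)

-- `h['position'] and h['position'] <= 40` as a boolean (a missing 'position' key is excluded by Pre_)
def pvPosTop40 (h : List (String × Option Int)) : Bool :=
  match PySem.Dict.getD (PySem.Dict.mk h) "position" (none : Option Int) with
  | none => false
  | some n => decide (n ≠ 0) && decide (n ≤ 40)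

-- A's for-loop over history with state (in_top40, exited_top40); early `return True`
def pvLoopA : List (List (String × Option Int)) → Bool → Bool → Bool
  | [], _, _ => false
  | week :: ws, inT, ex =>
    let isT := pvPosTop40 week
    if isT && !inT then
      if ex then true else pvLoopA ws true ex
    else if !isT && inT then
      pvLoopA ws false true
    else
      pvLoopA ws inT ex

def detect_resurgence (history : List (List (String × Option Int))) (top40_fields : List (String × Option Int)) : Bool :=
  if !pvTruthy (PySem.Dict.getD (PySem.Dict.mk top40_fields) "last_top40_week" (none : Option Int)) then false
  else
    let top40_weeks := history.filter pvPosTop40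
    if top40_weeks.length < 2 then false
    else pvLoopA history false false

-- ===== PORT B =====
def detect_resurgence_alt (history : List (List (String × Option Int))) (top40_fields : List (String × Option Int)) : Bool :=
  if !pvTruthy (PySem.Dict.getD (PySem.Dict.mk top40_fields) "last_top40_week" (none : Option Int)) then false
  else
    let top40_idx : List Int := ((PySem.List.enumerate history 0).filter (fun p => pvPosTop40 p.2)).map (·.1)
    if top40_idx.length < 2 then false
    else
      match PySem.List.pyGet? top40_idx (-1), PySem.List.pyGet? top40_idx 0 with
      | some lastI, some firstI => decide (lastI - firstI + 1 > (top40_idx.length : Int))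
      | _, _ => false

-- ===== PRECONDITION & SPEC =====
-- Pre_ excludes exactly the inputs on which A raises KeyError: top40_fields must carry
-- 'last_top40_week', and when that value is truthy every history entry must carry 'position'.
def Pre_detect_resurgence (history : List (List (String × Option Int))) (top40_fields : List (String × Option Int)) : Prop :=
  (PySem.Dict.get? (PySem.Dict.mk top40_fields) "last_top40_week").isSome = true ∧
  ((PySem.Dict.getD (PySem.Dict.mk top40_fields) "last_top40_week" (none : Option Int) ≠ none ∧
    PySem.Dict.getD (PySem.Dict.mk top40_fields) "last_top40_week" (none : Option Int) ≠ some 0) →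
    ∀ h ∈ history, (PySem.Dict.get? (PySem.Dict.mk h) "position").isSome = true)
instance (history : List (List (String × Option Int))) (top40_fields : List (String × Option Int)) : Decidable (Pre_detect_resurgence history top40_fields) := by unfold Pre_detect_resurgence; infer_instance

def pvWitness_detect_resurgence : (List (List (String × Option Int))) × (List (String × Option Int)) :=
  ([[("position", some 10)], [("position", none)], [("position", some 5)]], [("last_top40_week", some 1)])

def Spec_detect_resurgence (history : List (List (String × Option Int))) (top40_fields : List (String × Option Int)) (out : Bool) : Prop := out = detect_resurgence_alt history top40_fields
instance (history : List (List (String × Option Int))) (top40_fields : List (String × Option Int)) (out : Bool) : Decidable (Spec_detect_resurgence history top40_fields out) := by unfold Spec_detect_resurgence; infer_instance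

-- ===== CLAIM (what is proved, stated in full; the proofs are below) =====
def Claim_equal_detect_resurgence : Prop := ∀ (history : List (List (String × Option Int))) (top40_fields : List (String × Option Int)), Dom_detect_resurgence history top40_fields → Pre_detect_resurgence history top40_fields → Spec_detect_resurgence history top40_fields (detect_resurgence history top40_fields)

-- ===== LEMMAS AND PROOFS =====

-- A's loop on the abstract Top-40 bit list
def loopB : List Bool → Bool → Bool → Bool
  | [], _, _ => false
  | b :: t, inT, ex =>
    if b && !inT then
      if ex then true else loopB t true ex
    else if !b && inT then
      loopB t false true
    else
      loopB t inT ex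

-- indices (from 0) of the true entries
def idxI : List Bool → List Int
  | [] => []
  | true :: t => 0 :: (idxI t).map (· + 1)
  | false :: t => (idxI t).map (· + 1)

-- reference predicate: a true after the first contiguous true-run
def hasTFT (bs : List Bool) : Bool := ((bs.dropWhile (fun b => !b)).dropWhile id).any id

lemma getLast?_cons_ne (x : Int) (l : List Int) (h : l ≠ []) : (x :: l).getLast? = l.getLast? := by
  cases l with
  | nil => exact absurd rfl h
  | cons a as => exact List.getLast?_cons_cons

lemma pvLoopA_eq_loopB (hs : List (List (String × Option Int))) (inT ex : Bool) :
    pvLoopA hs inT ex = loopB (hs.map pvPosTop40) inT ex := by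
  induction hs generalizing inT ex with
  | nil => rfl
  | cons w ws ih => simp [pvLoopA, loopB, ih]

lemma loopB_false_true (bs : List Bool) : loopB bs false true = bs.any id := by
  induction bs with
  | nil => rfl
  | cons b t ih => cases b <;> simp [loopB, ih]

lemma loopB_true (bs : List Bool) (ex : Bool) :
    loopB bs true ex = (bs.dropWhile id).any id := by
  induction bs generalizing ex with
  | nil => rfl
  | cons b t ih =>
    cases b with
    | true => simpa [loopB] using ih ex
    | false => cases ex <;> simp [loopB, loopB_false_true]

lemma loopB_eq_hasTFT (bs : List Bool) : loopB bs false false = hasTFT bs := by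
  induction bs with
  | nil => rfl
  | cons b t ih =>
    cases b with
    | true => simp [loopB, loopB_true, hasTFT]
    | false => simpa [loopB, hasTFT] using ih

lemma idxI_nil_iff (bs : List Bool) : idxI bs = [] ↔ bs.any id = false := by
  induction bs with
  | nil => simp [idxI]
  | cons b t ih => cases b <;> simp [idxI, ih]

lemma length_idxI (bs : List Bool) : (idxI bs).length = (bs.filter id).length := by
  induction bs with
  | nil => rfl
  | cons b t ih => cases b <;> simp [idxI, ih]

lemma idxI_getLast?_ne_none (bs : List Bool) (hne : idxI bs ≠ []) :
    ∃ lu, (idxI bs).getLast? = some lu := by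
  cases h : (idxI bs).getLast? with
  | none => exact absurd (List.getLast?_eq_none_iff.1 h) hne
  | some lu => exact ⟨lu, rfl⟩

-- count of trues is at most last index + 1
lemma idxI_count_le (bs : List Bool) (lastI : Int) (h : (idxI bs).getLast? = some lastI) :
    ((idxI bs).length : Int) ≤ lastI + 1 := by
  induction bs generalizing lastI with
  | nil => simp [idxI] at h
  | cons b t ih =>
    cases b with
    | false =>
      simp only [idxI, List.getLast?_map] at h ⊢
      cases hu : (idxI t).getLast? with
      | none => simp [hu] at h
      | some lu =>
        simp [hu] at h
        have := ih lu hu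
        simp only [List.length_map]
        omega
    | true =>
      simp only [idxI] at h ⊢
      by_cases hnil : idxI t = []
      · simp [hnil] at h ⊢; omega
      · have hne : (idxI t).map (· + 1) ≠ [] := by simpa using hnil
        obtain ⟨lu, hu⟩ := idxI_getLast?_ne_none t hnil
        rw [getLast?_cons_ne _ _ hne, List.getLast?_map, hu] at h
        simp at h
        have := ih lu hu
        simp only [List.length_cons, List.length_map]
        omega

lemma any_dropWhile_false (bs : List Bool) (h : bs.any id = false) :
    (bs.dropWhile id).any id = false := by
  cases bs with
  | nil => rfl
  | cons b t => cases b <;> simp_all [List.dropWhile]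

-- key fact: last Top-40 index + 1 exceeds the count of trues iff a true occurs after the first run
lemma tail_resurge (bs : List Bool) (lastI : Int) (h : (idxI bs).getLast? = some lastI) :
    decide (lastI + 1 > ((idxI bs).length : Int)) = (bs.dropWhile id).any id := by
  induction bs generalizing lastI with
  | nil => simp [idxI] at h
  | cons b t ih =>
    cases b with
    | false =>
      simp only [idxI, List.getLast?_map] at h
      cases hu : (idxI t).getLast? with
      | none => simp [hu] at h
      | some lu =>
        simp [hu] at h
        have hcnt := idxI_count_le t lu hu
        have htrue : t.any id = true := by
          by_contra hc
          simp only [Bool.not_eq_true] at hc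
          rw [(idxI_nil_iff t).2 hc] at hu; simp at hu
        subst h
        simp only [idxI, List.length_map, List.dropWhile_cons, id]
        simp [htrue]
        omega
    | true =>
      simp only [idxI] at h ⊢
      by_cases hnil : idxI t = []
      · have hno : t.any id = false := (idxI_nil_iff t).1 hnil
        simp [hnil] at h
        subst h
        simp [any_dropWhile_false t hno]
      · have hne : (idxI t).map (· + 1) ≠ [] := by simpa using hnil
        obtain ⟨lu, hu⟩ := idxI_getLast?_ne_none t hnil
        rw [getLast?_cons_ne _ _ hne, List.getLast?_map, hu] at h
        simp at h
        subst h
        have hT := ih lu hu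
        have hrw : ((true :: t).dropWhile id).any id = (t.dropWhile id).any id := by
          simp
        rw [hrw, ← hT, decide_eq_decide]
        simp only [List.length_cons, List.length_map]
        omega

-- B's span check equals the reference predicate once there are ≥ 2 Top-40 weeks
lemma span_eq_hasTFT (bs : List Bool) (h2 : 2 ≤ (idxI bs).length) :
    (match PySem.List.pyGet? (idxI bs) (-1), PySem.List.pyGet? (idxI bs) 0 with
      | some lastI, some firstI => decide (lastI - firstI + 1 > ((idxI bs).length : Int))
      | _, _ => false) = hasTFT bs := by
  induction bs with
  | nil => simp [idxI] at h2
  | cons b t ih =>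
    cases b with
    | false =>
      simp only [idxI, List.length_map] at h2 ⊢
      rw [PySem.List.pyGet?_neg_one, PySem.List.pyGet?_zero] at ih ⊢
      rw [List.getLast?_map]
      have hnil : idxI t ≠ [] := by intro hc; simp [hc] at h2
      obtain ⟨lu, hu⟩ := idxI_getLast?_ne_none t hnil
      cases hh : (idxI t)[0]? with
      | none => rw [List.getElem?_eq_none_iff] at hh; omega
      | some fu =>
        have hIH := ih h2
        rw [hu, hh] at hIH
        rw [hu, List.getElem?_map, hh]
        simp only [Option.map_some]
        have hrwF : hasTFT (false :: t) = hasTFT t := by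
          simp [hasTFT]
        rw [hrwF, ← hIH, decide_eq_decide]
        omega
    | true =>
      simp only [idxI, List.length_cons, List.length_map] at h2 ⊢
      have hnil : idxI t ≠ [] := by intro hc; simp [hc] at h2
      have hne : (idxI t).map (· + 1) ≠ [] := by simpa using hnil
      obtain ⟨lu, hu⟩ := idxI_getLast?_ne_none t hnil
      rw [PySem.List.pyGet?_neg_one, PySem.List.pyGet?_zero,
          getLast?_cons_ne _ _ hne, List.getLast?_map, hu]
      simp only [Option.map_some, List.getElem?_cons_zero]
      have hT := tail_resurge t lu hu
      have hrwT : hasTFT (true :: t) = (t.dropWhile id).any id := by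
        simp [hasTFT]
      rw [hrwT, ← hT, decide_eq_decide]
      omega

-- B's index list over history is idxI of the bit list (shifted by the enumerate start)
lemma enum_filter_map (hs : List (List (String × Option Int))) (s : Int) :
    ((PySem.List.enumerate hs s).filter (fun p => pvPosTop40 p.2)).map (·.1)
      = (idxI (hs.map pvPosTop40)).map (· + s) := by
  induction hs generalizing s with
  | nil => simp [PySem.List.enumerate_nil, idxI]
  | cons w ws ih =>
    rw [PySem.List.enumerate_cons, List.filter_cons]
    cases hb : pvPosTop40 w with
    | false =>
      rw [if_neg (by simp)]
      simp only [List.map_cons, hb, idxI]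
      rw [ih (s + 1), List.map_map]
      apply List.map_congr_left
      intro x _
      simp only [Function.comp]
      omega
    | true =>
      rw [if_pos (by simp)]
      simp only [List.map_cons, hb, idxI]
      rw [ih (s + 1), List.map_map]
      congr 1
      · omega
      · apply List.map_congr_left
        intro x _
        simp only [Function.comp]
        omega

lemma filter_length_eq (hs : List (List (String × Option Int))) :
    (hs.filter pvPosTop40).length = (idxI (hs.map pvPosTop40)).length := by
  rw [length_idxI, List.filter_map]
  simp

-- ===== VERDICT (by name: the statement is the Claim_ definition above) =====
theorem detect_resurgence_spec : Claim_equal_detect_resurgence := by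
  intro history top40_fields _ _
  unfold Spec_detect_resurgence detect_resurgence detect_resurgence_alt
  cases htr : pvTruthy (PySem.Dict.getD (PySem.Dict.mk top40_fields) "last_top40_week" (none : Option Int)) with
  | false => simp
  | true =>
    simp only [Bool.not_true, Bool.false_eq_true, if_false]
    rw [enum_filter_map history 0]
    have hm0 : (idxI (history.map pvPosTop40)).map (· + (0 : Int)) = idxI (history.map pvPosTop40) := by
      simp
    rw [hm0, filter_length_eq]
    by_cases h2 : (idxI (history.map pvPosTop40)).length < 2
    · simp [h2]
    · simp only [if_neg h2]
      rw [pvLoopA_eq_loopB, loopB_eq_hasTFT, ← span_eq_hasTFT _ (by omega)]
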